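-- pv_equiv track=rewrite | github.com/joseslavkis/Teoria-de-Algoritmos | Greedy/ej9.py | minimizar_latencia
-- ===== SOURCE A (Python) =====
-- def minimizar_latencia(L_deadline, T_tareas):
--     i = 0
--     res = []
--     tareas = []
--     while i < len(L_deadline):
--         deadline =  L_deadline[i]
--         tiempo = T_tareas[i]
--         tareas.append((deadline,tiempo))
--         i += 1
--     ordenado = sorted(tareas, key=lambda x: x[0])
--     fecha = 0
--     for tarea in ordenado:
--         deadline, tiempo = tarea
--         latencia = (fecha + tiempo) - deadline
--         fecha += tiempo
--         if latencia < 0: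
--             latencia = 0
--         res.append((tiempo,latencia))
--     return res
-- ===== SOURCE B (Python) =====
-- def minimizar_latencia(L_deadline, T_tareas):
--     # decorate-sort-undecorate: pair each task with its original index so the
--     # merge sort needs no stability, then hand merge sort by (deadline, index)
--     dec = [(L_deadline[i], i, T_tareas[i]) for i in range(len(L_deadline))]
--
--     def msort(lst):
--         if len(lst) <= 1:
--             return lst
--         m = len(lst) // 2
--         izq = msort(lst[:m])
--         der = msort(lst[m:])
--         out = []
--         a, b = 0, 0
--         while a < len(izq) and b < len(der):
--             if (izq[a][0], izq[a][1]) <= (der[b][0], der[b][1]):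
--                 out.append(izq[a])
--                 a += 1
--             else:
--                 out.append(der[b])
--                 b += 1
--         out.extend(izq[a:])
--         out.extend(der[b:])
--         return out
--
--     ordenado = msort(dec)
--     # completion times recovered back-to-front from the total duration
--     fin = 0
--     for _, _, t in ordenado:
--         fin += t
--     res = []
--     for d, _, t in reversed(ordenado):
--         lat = fin - d
--         res.append((t, lat if lat > 0 else 0))
--         fin -= t
--     res.reverse()
--     return res
-- ===== Notes on version B (the rewrite author's own statement) =====
-- stated objective: alternative
-- what changed: B decorates each task with its original index, sorts with a hand-written merge sort on (deadline, index) instead of the library stable sort, and computes latencies in a backward pass that recovers completion times by subtracting durations from the total, instead of A's forward running-sum loop.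
import Mathlib
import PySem

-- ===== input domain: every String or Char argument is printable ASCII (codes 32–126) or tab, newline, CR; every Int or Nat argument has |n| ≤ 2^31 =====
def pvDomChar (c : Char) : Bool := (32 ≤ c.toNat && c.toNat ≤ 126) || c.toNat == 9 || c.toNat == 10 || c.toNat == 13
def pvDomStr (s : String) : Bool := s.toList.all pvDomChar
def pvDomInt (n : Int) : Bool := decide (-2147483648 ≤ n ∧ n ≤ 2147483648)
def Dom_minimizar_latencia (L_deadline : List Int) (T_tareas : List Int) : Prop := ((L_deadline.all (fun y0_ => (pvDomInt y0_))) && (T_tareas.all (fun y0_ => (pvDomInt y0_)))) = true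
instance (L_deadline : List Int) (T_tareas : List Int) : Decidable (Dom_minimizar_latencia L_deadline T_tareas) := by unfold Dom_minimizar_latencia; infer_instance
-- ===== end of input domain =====

-- B replaces A's library stable sort + forward running-sum loop by decorate-sort-undecorate
-- with a hand-written merge sort on (deadline, index) and a backward pass recovering each
-- completion time from the total duration (alternative decomposition, similar cost).
-- ===== PORT A =====
def minimizar_latencia (L_deadline : List Int) (T_tareas : List Int) : List (Int × Int) :=
  -- while i < len(L_deadline): tareas.append((L_deadline[i], T_tareas[i])); i += 1
  -- out-of-range T_tareas[i] is an IndexError in Python; Pre_ excludes it, the 0 default is never reached there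
  let tareas :=
    (PySem.List.pyRange 0 L_deadline.length 1).foldl
      (fun acc i => acc ++ [(PySem.List.pyGetD L_deadline i 0, PySem.List.pyGetD T_tareas i 0)]) []
  let ordenado := PySem.List.sorted tareas (fun x => x.1)
  (ordenado.foldl
    (fun (st : Int × List (Int × Int)) tarea =>
      let latencia := (st.1 + tarea.2) - tarea.1
      let fecha := st.1 + tarea.2
      let latencia := if latencia < 0 then 0 else latencia
      (fecha, st.2 ++ [(tarea.2, latencia)]))
    (0, [])).2

-- ===== PORT B =====
-- merge step of Source B's msort: the while-loop over indices a, b taking the lexicographically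
-- (deadline, index) smaller head, then the two extends with the leftover tails; the fuel
-- (always sufficient at len(izq)+len(der)) only makes the recursion structural
def pvMergeF : Nat → List (Int × Int × Int) → List (Int × Int × Int) → List (Int × Int × Int)
  | 0, izq, der => izq ++ der
  | fuel + 1, izq, der =>
      match izq, der with
      | [], der => der
      | x :: xs, [] => x :: xs
      | x :: xs, y :: ys =>
          if x.1 < y.1 ∨ (x.1 = y.1 ∧ x.2.1 ≤ y.2.1) then x :: pvMergeF fuel xs (y :: ys)
          else y :: pvMergeF fuel (x :: xs) ys

def pvMerge (izq der : List (Int × Int × Int)) : List (Int × Int × Int) :=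
  pvMergeF (izq.length + der.length) izq der

-- def msort(lst): split at len(lst)//2 (Nat division = Python's // on these nonnegative
-- lengths), recurse on both halves, merge; the fuel only makes the recursion structural
-- (len(lst) calls always suffice), it changes nothing the Python computes
def pvMsortF : Nat → List (Int × Int × Int) → List (Int × Int × Int)
  | 0, lst => lst
  | fuel + 1, lst =>
      if lst.length ≤ 1 then lst
      else pvMerge (pvMsortF fuel (lst.take (lst.length / 2)))
                   (pvMsortF fuel (lst.drop (lst.length / 2)))

def pvMsort (lst : List (Int × Int × Int)) : List (Int × Int × Int) :=
  pvMsortF lst.length lst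

def minimizar_latencia_alt (L_deadline : List Int) (T_tareas : List Int) : List (Int × Int) :=
  -- dec = [(L_deadline[i], i, T_tareas[i]) for i in range(len(L_deadline))]
  -- (an out-of-range T_tareas[i] raises IndexError exactly as in A; Pre_ excludes it,
  --  the default 0 is never reached there)
  let dec := (PySem.List.pyRange 0 L_deadline.length 1).map
      (fun i => (PySem.List.pyGetD L_deadline i 0, i, PySem.List.pyGetD T_tareas i 0))
  let ordenado := pvMsort dec
  -- fin = 0; for _, _, t in ordenado: fin += t
  let fin0 := ordenado.foldl (fun s a => s + a.2.2) 0
  -- for d, _, t in reversed(ordenado): res.append((t, lat if lat > 0 else 0)); fin -= t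
  let loop := ordenado.reverse.foldl
      (fun (st : Int × List (Int × Int)) a =>
        let lat := st.1 - a.1
        (st.1 - a.2.2, st.2 ++ [(a.2.2, if lat > 0 then lat else 0)]))
      (fin0, [])
  -- res.reverse()
  loop.2.reverse

-- ===== PRECONDITION & SPEC =====
-- Pre_ excludes exactly the inputs where T_tareas is shorter than L_deadline:
-- there A raises IndexError (and so does B).
def Pre_minimizar_latencia (L_deadline : List Int) (T_tareas : List Int) : Prop :=
  L_deadline.length ≤ T_tareas.length
instance (L_deadline : List Int) (T_tareas : List Int) : Decidable (Pre_minimizar_latencia L_deadline T_tareas) := by unfold Pre_minimizar_latencia; infer_instance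
def pvWitness_minimizar_latencia : List Int × List Int := ([3, 1, 2], [2, 1, 1])

def Spec_minimizar_latencia (L_deadline : List Int) (T_tareas : List Int) (out : List (Int × Int)) : Prop := out = minimizar_latencia_alt L_deadline T_tareas
instance (L_deadline : List Int) (T_tareas : List Int) (out : List (Int × Int)) : Decidable (Spec_minimizar_latencia L_deadline T_tareas out) := by unfold Spec_minimizar_latencia; infer_instance

-- ===== CLAIM (what is proved, stated in full; the proofs are below) =====
def Claim_equal_minimizar_latencia : Prop := ∀ (L_deadline : List Int) (T_tareas : List Int), Dom_minimizar_latencia L_deadline T_tareas → Pre_minimizar_latencia L_deadline T_tareas → Spec_minimizar_latencia L_deadline T_tareas (minimizar_latencia L_deadline T_tareas)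

-- ===== LEMMAS AND PROOFS =====

-- the projection dropping the decoration index, and the merge orders on decorated tasks
def pvProj (a : Int × Int × Int) : Int × Int := (a.1, a.2.2)
def pvRle (a b : Int × Int × Int) : Prop := a.1 < b.1 ∨ (a.1 = b.1 ∧ a.2.1 ≤ b.2.1)
def pvRlt (a b : Int × Int × Int) : Prop := a.1 < b.1 ∨ (a.1 = b.1 ∧ a.2.1 < b.2.1)

lemma pvMergeF_perm : ∀ (fuel : Nat) (l1 l2 : List (Int × Int × Int)),
    (pvMergeF fuel l1 l2).Perm (l1 ++ l2) := by
  intro fuel l1 l2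
  fun_induction pvMergeF fuel l1 l2 with
  | case1 => exact List.Perm.refl _
  | case2 => simp
  | case3 => simp
  | case4 fuel x xs y ys h ih =>
      exact (ih.cons x).trans (by simp)
  | case5 fuel x xs y ys h ih =>
      exact (ih.cons y).trans (List.perm_middle).symm

lemma pvMerge_perm (l1 l2 : List (Int × Int × Int)) : (pvMerge l1 l2).Perm (l1 ++ l2) :=
  pvMergeF_perm _ l1 l2

lemma pvMergeF_mem (fuel : Nat) (l1 l2 : List (Int × Int × Int)) (z : Int × Int × Int) :
    z ∈ pvMergeF fuel l1 l2 ↔ z ∈ l1 ∨ z ∈ l2 := by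
  rw [(pvMergeF_perm fuel l1 l2).mem_iff]; simp

lemma pvMergeF_pairwise : ∀ (fuel : Nat) (l1 l2 : List (Int × Int × Int)),
    l1.length + l2.length ≤ fuel →
    l1.Pairwise pvRle → l2.Pairwise pvRle → (pvMergeF fuel l1 l2).Pairwise pvRle := by
  intro fuel l1 l2
  fun_induction pvMergeF fuel l1 l2 with
  | case1 izq der =>
      intro hf h1 h2
      have : izq = [] ∧ der = [] := by
        constructor <;> [skip; skip] <;>
          exact List.eq_nil_of_length_eq_zero (by omega)
      rw [this.1, this.2]
      simp
  | case2 => intro _ _ h; exact h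
  | case3 => intro _ h _; exact h
  | case4 fuel x xs y ys h ih =>
      intro hf h1 h2
      refine List.Pairwise.cons ?_ (ih (by simp at hf ⊢; omega) h1.of_cons h2)
      intro z hz
      rcases (pvMergeF_mem _ _ _ z).1 hz with hz | hz
      · exact List.rel_of_pairwise_cons h1 hz
      · cases hz with
        | head => exact h
        | tail _ hz =>
          have hyz := List.rel_of_pairwise_cons h2 hz
          unfold pvRle at *; omega
  | case5 fuel x xs y ys h ih =>
      intro hf h1 h2
      refine List.Pairwise.cons ?_ (ih (by simp at hf ⊢; omega) h1 h2.of_cons)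
      intro z hz
      have hyx : pvRle y x := by unfold pvRle at *; omega
      rcases (pvMergeF_mem _ _ _ z).1 hz with hz | hz
      · cases hz with
        | head => exact hyx
        | tail _ hz =>
          have := List.rel_of_pairwise_cons h1 hz
          unfold pvRle at *; omega
      · exact List.rel_of_pairwise_cons h2 hz

lemma pvMerge_pairwise (l1 l2 : List (Int × Int × Int)) :
    l1.Pairwise pvRle → l2.Pairwise pvRle → (pvMerge l1 l2).Pairwise pvRle :=
  pvMergeF_pairwise _ l1 l2 le_rfl

lemma pvMsortF_perm : ∀ (fuel : Nat) (l : List (Int × Int × Int)), (pvMsortF fuel l).Perm l := by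
  intro fuel
  induction fuel with
  | zero => intro l; exact List.Perm.refl l
  | succ n ih =>
      intro l
      simp only [pvMsortF]
      split
      · exact List.Perm.refl l
      · exact (pvMerge_perm _ _).trans (((ih _).append (ih _)).trans (by simp))

lemma pvMsort_perm : ∀ (l : List (Int × Int × Int)), (pvMsort l).Perm l :=
  fun l => pvMsortF_perm l.length l

lemma pvMsortF_pairwise : ∀ (fuel : Nat) (l : List (Int × Int × Int)),
    l.length ≤ fuel → (pvMsortF fuel l).Pairwise pvRle := by
  intro fuel
  induction fuel with
  | zero =>
      intro l hl
      have : l = [] := List.eq_nil_of_length_eq_zero (by omega)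
      subst this
      simp [pvMsortF]
  | succ n ih =>
      intro l hl
      simp only [pvMsortF]
      split
      · rename_i h
        cases l with
        | nil => simp
        | cons a t =>
          cases t with
          | nil => simp
          | cons b u => simp at h
      · rename_i h
        refine pvMerge_pairwise _ _ (ih _ ?_) (ih _ ?_)
        · simp only [List.length_take]; omega
        · simp only [List.length_drop]; omega

lemma pvMsort_pairwise : ∀ (l : List (Int × Int × Int)), (pvMsort l).Pairwise pvRle :=
  fun l => pvMsortF_pairwise l.length l le_rfl

-- insertBy walks past a prefix it does not insert before
lemma insertBy_append_of_not_before {α : Type} (before : α → α → Bool) (x : α)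
    (us vs : List α) (h : ∀ u ∈ us, before x u = false) :
    PySem.List.insertBy before x (us ++ vs) = us ++ PySem.List.insertBy before x vs := by
  induction us with
  | nil => simp
  | cons u us ih =>
      have hu : before x u = false := h u (by simp)
      simp [PySem.List.insertBy, hu, ih (fun v hv => h v (by simp [hv]))]

-- stability bridge: any strictly (deadline, index)-increasing rearrangement of the decorated
-- list projects to Python's stable sort of the undecorated list, provided the decoration
-- indices are strictly increasing
lemma pvBridge : ∀ (dec ys : List (Int × Int × Int)),
    ys.Perm dec → ys.Pairwise pvRlt →
    ((dec.map (fun a => a.2.1)).Pairwise (· < ·)) →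
    PySem.List.sorted (dec.map pvProj) (fun p => p.1) = ys.map pvProj := by
  intro dec
  induction dec using List.reverseRecOn with
  | nil =>
      intro ys hperm _ _
      have h0 : ys = [] := by simpa using hperm
      subst h0
      simp [PySem.List.sorted_eq_foldl_insertBy]
  | append_singleton ds z ih =>
      intro ys hperm hpw hidx
      -- decompose the index hypothesis
      rw [List.map_append, List.pairwise_append] at hidx
      have hds : (ds.map (fun a => a.2.1)).Pairwise (· < ·) := hidx.1
      have hzmax : ∀ a ∈ ds, a.2.1 < z.2.1 := by
        intro a ha
        exact hidx.2.2 _ (List.mem_map_of_mem ha) _ (by simp)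
      -- split ys around z
      have hz : z ∈ ys := hperm.mem_iff.2 (by simp)
      obtain ⟨us, vs, rfl⟩ := List.append_of_mem hz
      have huv : (us ++ vs).Perm ds := by
        have h1 : (us ++ z :: vs).Perm (z :: (us ++ vs)) := List.perm_middle
        have h2 : (ds ++ [z]).Perm (z :: ds) := List.perm_append_singleton z ds
        exact (h1.symm.trans (hperm.trans h2)).cons_inv
      have hpw' : (us ++ vs).Pairwise pvRlt :=
        hpw.sublist ((List.Sublist.refl us).append (List.sublist_cons_self z vs))
      have hmem : ∀ a, a ∈ us ++ vs → a ∈ ds := fun a ha => huv.mem_iff.1 ha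
      rw [List.pairwise_append] at hpw
      -- compute the stable sort of the extended list
      have hsorted := PySem.List.sorted_eq_foldl_insertBy ((ds ++ [z]).map pvProj) (fun p => p.1)
      rw [List.map_append, List.foldl_append] at hsorted
      rw [List.map_append, hsorted]
      simp only [List.map_cons, List.foldl_cons]
      rw [← PySem.List.sorted_eq_foldl_insertBy (ds.map pvProj) (fun p => p.1)]
      rw [ih (us ++ vs) huv hpw' hds]
      rw [List.map_append (f := pvProj) (l₁ := us)]
      rw [insertBy_append_of_not_before _ _ _ _ (by
        intro u hu
        obtain ⟨a, ha, rfl⟩ := List.mem_map.1 hu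
        have : pvRlt a z := hpw.2.2 a ha z (by simp)
        simp only [pvProj, decide_eq_false_iff_not, not_lt]
        unfold pvRlt at this
        have := hzmax a (hmem a (by simp [ha]))
        omega)]
      have hins : PySem.List.insertBy (fun a b => decide (a.1 < b.1)) (pvProj z) (vs.map pvProj)
          = pvProj z :: vs.map pvProj := by
        cases vs with
        | nil => simp [PySem.List.insertBy]
        | cons v vs' =>
            have hzv : pvRlt z v := (List.rel_of_pairwise_cons hpw.2.1) (by simp)
            have hvz : v.2.1 < z.2.1 := hzmax v (hmem v (by simp))
            have : z.1 < v.1 := by unfold pvRlt at hzv; omega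
            simp [PySem.List.insertBy, pvProj, this]
      rw [hins]
      simp

-- the output of pvMsort is strictly (deadline, index)-increasing when the indices are distinct
lemma pvMsort_pairwise_lt (dec : List (Int × Int × Int))
    (h : (dec.map (fun a => a.2.1)).Pairwise (· < ·)) :
    (pvMsort dec).Pairwise pvRlt := by
  have hperm : ((pvMsort dec).map (fun a => a.2.1)).Perm (dec.map (fun a => a.2.1)) :=
    (pvMsort_perm dec).map _
  have hnd : ((pvMsort dec).map (fun a => a.2.1)).Nodup :=
    hperm.nodup_iff.2 (h.imp ne_of_lt)
  have hne : (pvMsort dec).Pairwise (fun a b => a.2.1 ≠ b.2.1) := List.pairwise_map.1 hnd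
  exact ((pvMsort_pairwise dec).and hne).imp (by
    intro a b hab
    unfold pvRle pvRlt at *
    omega)

-- A's forward accumulator loop appends to whatever result list it is started with
lemma pvAfold_acc (o : List (Int × Int)) : ∀ (f : Int) (r : List (Int × Int)),
    (o.foldl
      (fun (st : Int × List (Int × Int)) tarea =>
        let latencia := (st.1 + tarea.2) - tarea.1
        let fecha := st.1 + tarea.2
        let latencia := if latencia < 0 then 0 else latencia
        (fecha, st.2 ++ [(tarea.2, latencia)]))
      (f, r)).2
    = r ++ (o.foldl
      (fun (st : Int × List (Int × Int)) tarea =>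
        let latencia := (st.1 + tarea.2) - tarea.1
        let fecha := st.1 + tarea.2
        let latencia := if latencia < 0 then 0 else latencia
        (fecha, st.2 ++ [(tarea.2, latencia)]))
      (f, [])).2 := by
  induction o with
  | nil => simp
  | cons p rest ih =>
      intro f r
      simp only [List.foldl_cons, List.nil_append]
      rw [ih (f + p.2) (r ++ _), ih (f + p.2) ([_])]
      simp

-- so does B's backward loop
lemma pvBack_acc (l : List (Int × Int)) : ∀ (s : Int) (r : List (Int × Int)),
    (l.foldl (fun (st : Int × List (Int × Int)) p =>
        (st.1 - p.2, st.2 ++ [(p.2, if st.1 - p.1 > 0 then st.1 - p.1 else 0)])) (s, r)).2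
    = r ++ (l.foldl (fun (st : Int × List (Int × Int)) p =>
        (st.1 - p.2, st.2 ++ [(p.2, if st.1 - p.1 > 0 then st.1 - p.1 else 0)])) (s, [])).2 := by
  induction l with
  | nil => simp
  | cons p rest ih =>
      intro s r
      simp only [List.foldl_cons, List.nil_append]
      rw [ih (s - p.2) (r ++ _), ih (s - p.2) ([_])]
      simp

-- first component of B's backward fold: running remainder of the total duration
lemma pvBack_fst (l : List (Int × Int)) : ∀ (s : Int) (acc : List (Int × Int)),
    (l.foldl (fun (st : Int × List (Int × Int)) p =>
        (st.1 - p.2, st.2 ++ [(p.2, if st.1 - p.1 > 0 then st.1 - p.1 else 0)])) (s, acc)).1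
      = s - (l.map (fun p => p.2)).sum := by
  induction l with
  | nil => simp
  | cons p rest ih =>
      intro s acc
      simp only [List.foldl_cons, List.map_cons, List.sum_cons]
      rw [ih]
      ring

-- B's duration-summing loop is the list sum
lemma pvSum_eq (l : List (Int × Int)) : ∀ (t : Int),
    l.foldl (fun t p => t + p.2) t = t + (l.map (fun p => p.2)).sum := by
  induction l with
  | nil => simp
  | cons p rest ih =>
      intro t
      simp only [List.foldl_cons, List.map_cons, List.sum_cons]
      rw [ih]
      ring

-- A's forward accumulator loop equals B's backward loop started from the total duration
lemma pvForward_backward (o : List (Int × Int)) : ∀ (f : Int),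
    (o.foldl
      (fun (st : Int × List (Int × Int)) tarea =>
        let latencia := (st.1 + tarea.2) - tarea.1
        let fecha := st.1 + tarea.2
        let latencia := if latencia < 0 then 0 else latencia
        (fecha, st.2 ++ [(tarea.2, latencia)]))
      (f, [])).2
    = ((o.reverse.foldl (fun (st : Int × List (Int × Int)) p =>
        (st.1 - p.2, st.2 ++ [(p.2, if st.1 - p.1 > 0 then st.1 - p.1 else 0)]))
        (f + (o.map (fun p => p.2)).sum, [])).2).reverse := by
  induction o with
  | nil => simp
  | cons p rest ih =>
      intro f
      simp only [List.foldl_cons, List.reverse_cons, List.map_cons, List.sum_cons]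
      rw [pvAfold_acc, List.foldl_append, List.nil_append]
      have hfst := pvBack_fst rest.reverse (f + (p.2 + (rest.map (fun p => p.2)).sum)) []
      rw [List.map_reverse, List.sum_reverse] at hfst
      have harg : f + (p.2 + (rest.map (fun p => p.2)).sum)
          = (f + p.2) + (rest.map (fun p => p.2)).sum := by ring
      rw [harg] at hfst ⊢
      rw [pvBack_acc, hfst, ih (f + p.2)]
      simp only [List.reverse_append]
      have : ((f + p.2) + (rest.map (fun p => p.2)).sum) - (rest.map (fun p => p.2)).sum
          = f + p.2 := by ring
      rw [this]
      simp
      split_ifs <;> omega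

-- range(len(L)) is strictly increasing
lemma pvPyRange_pairwise_lt (n : Int) : (PySem.List.pyRange 0 n 1).Pairwise (· < ·) := by
  rw [List.pairwise_iff_getElem]
  intro i j hi hj hij
  rw [PySem.List.getElem_pyRange_one, PySem.List.getElem_pyRange_one]
  omega

-- ===== VERDICT (by name: the statement is the Claim_ definition above) =====
theorem minimizar_latencia_spec : Claim_equal_minimizar_latencia := by
  intro L T _ _
  unfold Spec_minimizar_latencia minimizar_latencia minimizar_latencia_alt
  rw [PySem.List.foldl_append_singleton_eq_map, List.nil_append]
  have hmapproj : ((PySem.List.pyRange 0 L.length 1).map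
      (fun i => (PySem.List.pyGetD L i 0, i, PySem.List.pyGetD T i 0))).map pvProj
      = (PySem.List.pyRange 0 L.length 1).map
        (fun i => (PySem.List.pyGetD L i 0, PySem.List.pyGetD T i 0)) := by
    rw [List.map_map]; rfl
  have hidx : (((PySem.List.pyRange 0 L.length 1).map
      (fun i => (PySem.List.pyGetD L i 0, i, PySem.List.pyGetD T i 0))).map
        (fun a => a.2.1)).Pairwise (· < ·) := by
    rw [List.map_map]
    exact (List.pairwise_map.2 (by simpa using pvPyRange_pairwise_lt (L.length : Int)))
  have hbridge := pvBridge _ _ (pvMsort_perm _) (pvMsort_pairwise_lt _ hidx) hidx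
  dsimp only
  rw [← hmapproj, hbridge, pvForward_backward]
  set ys := pvMsort ((PySem.List.pyRange 0 L.length 1).map
      (fun i => (PySem.List.pyGetD L i 0, i, PySem.List.pyGetD T i 0))) with hys
  have hsum : (0:Int) + ((ys.map pvProj).map (fun p => p.2)).sum
      = ys.foldl (fun s a => s + a.2.2) 0 := by
    rw [← pvSum_eq (ys.map pvProj) 0, List.foldl_map]
    rfl
  rw [← List.map_reverse, List.foldl_map, hsum]
  rfl
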